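-- pv_equiv track=rewrite | github.com/sfad159357/aoi-ops-platform | services/spc-service/app/rules.py | _none_within_zone
-- ===== SOURCE A (Python) =====
-- def _none_within_zone(zones: list[int], run_length: int, zone_max: int) -> list[int]:
--     """連續 run_length 個點都不在 zone_max 以內（用於規則 8：連8點無±1σ內）"""
--     result: list[int] = []
--     n = len(zones)
--     for start in range(n - run_length + 1):
--         window = zones[start:start + run_length]
--         if all(z > zone_max for z in window):
--             for i in range(start, start + run_length):
--                 if i not in result:
--                     result.append(i)
--     return result
-- ===== SOURCE B (Python) =====
-- def _none_within_zone(zones: list[int], run_length: int, zone_max: int) -> list[int]: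
--     """Single linear scan: emit the indices of every maximal run of consecutive
--     points > zone_max whose length is at least run_length."""
--     if run_length <= 0:
--         return []
--     result: list[int] = []
--     count = 0
--     for i, z in enumerate(zones):
--         if z > zone_max:
--             count += 1
--         else:
--             if count >= run_length:
--                 result.extend(range(i - count, i))
--             count = 0
--     if count >= run_length:
--         result.extend(range(len(zones) - count, len(zones)))
--     return result
-- ===== Notes on version B (the rewrite author's own statement) =====
-- stated objective: faster
-- what changed: Replaced the sliding-window scan with membership-checked appends by a single linear pass that tracks the length of the current run of consecutive out-of-zone points and emits each qualifying run's index range once when the run ends.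
import Mathlib
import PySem

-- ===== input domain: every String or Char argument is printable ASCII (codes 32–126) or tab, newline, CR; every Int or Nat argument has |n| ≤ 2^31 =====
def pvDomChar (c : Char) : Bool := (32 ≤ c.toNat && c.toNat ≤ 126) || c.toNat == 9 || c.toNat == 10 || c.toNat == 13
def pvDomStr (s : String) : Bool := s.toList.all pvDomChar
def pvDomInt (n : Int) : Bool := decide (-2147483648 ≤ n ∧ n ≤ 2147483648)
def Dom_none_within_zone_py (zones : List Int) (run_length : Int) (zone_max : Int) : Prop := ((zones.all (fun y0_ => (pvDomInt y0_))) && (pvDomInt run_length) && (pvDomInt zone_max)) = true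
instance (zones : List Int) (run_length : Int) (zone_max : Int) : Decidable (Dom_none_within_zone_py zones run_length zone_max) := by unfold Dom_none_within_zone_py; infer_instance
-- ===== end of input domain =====

-- B replaces A's sliding-window + membership-check scan by one linear pass over runs of
-- consecutive out-of-zone points (faster; same return value, proved below).


-- ===== PORT A =====
def none_within_zone_py (zones : List Int) (run_length : Int) (zone_max : Int) : List Int :=
  let n : Int := zones.length
  (PySem.List.pyRange 0 (n - run_length + 1) 1).foldl
    (fun result start =>
      let window := PySem.List.slice zones (some start) (some (start + run_length))
      if window.all (fun z => zone_max < z) then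
        (PySem.List.pyRange start (start + run_length) 1).foldl
          (fun res i => if res.contains i then res else res ++ [i]) result
      else result) []

-- ===== PORT B =====
def none_within_zone_py_alt (zones : List Int) (run_length : Int) (zone_max : Int) : List Int :=
  if run_length ≤ 0 then []
  else
    let st :=
      (PySem.List.enumerate zones 0).foldl
        (fun (s : List Int × Int) p =>
          if zone_max < p.2 then (s.1, s.2 + 1)
          else
            (if run_length ≤ s.2 then s.1 ++ PySem.List.pyRange (p.1 - s.2) p.1 1 else s.1, 0))
        ([], 0)
    if run_length ≤ st.2 then
      st.1 ++ PySem.List.pyRange ((zones.length : Int) - st.2) (zones.length : Int) 1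
    else st.1

-- ===== PRECONDITION & SPEC =====
def Spec_none_within_zone_py (zones : List Int) (run_length : Int) (zone_max : Int) (out : List Int) : Prop := out = none_within_zone_py_alt zones run_length zone_max
instance (zones : List Int) (run_length : Int) (zone_max : Int) (out : List Int) : Decidable (Spec_none_within_zone_py zones run_length zone_max out) := by unfold Spec_none_within_zone_py; infer_instance

-- ===== CLAIM (what is proved, stated in full; the proofs are below) =====
def Claim_equal_none_within_zone_py : Prop := ∀ (zones : List Int) (run_length : Int) (zone_max : Int), Dom_none_within_zone_py zones run_length zone_max → Spec_none_within_zone_py zones run_length zone_max (none_within_zone_py zones run_length zone_max)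

-- ===== LEMMAS AND PROOFS =====

def pvGood (zones : List Int) (M j : Int) : Bool := decide (M < zones.getD j.toNat 0)
def pvWin (zones : List Int) (L M s : Int) : Bool :=
  (PySem.List.pyRange s (s + L) 1).all (pvGood zones M)
def pvP (zones : List Int) (L M m i : Int) : Bool :=
  (PySem.List.pyRange 0 m 1).any
    (fun s => pvWin zones L M s && decide (s ≤ i) && decide (i < s + L))

theorem pvWin_iff (zones : List Int) (L M s : Int) :
    pvWin zones L M s = true ↔ ∀ j : Int, s ≤ j → j < s + L → pvGood zones M j = true := by
  unfold pvWin
  rw [List.all_eq_true]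
  constructor
  · intro h j h1 h2; exact h j (by rw [PySem.List.mem_pyRange_one]; omega)
  · intro h j hj
    rw [PySem.List.mem_pyRange_one] at hj
    exact h j hj.1 hj.2

theorem pvP_iff (zones : List Int) (L M m i : Int) :
    pvP zones L M m i = true ↔
      ∃ s : Int, 0 ≤ s ∧ s < m ∧ pvWin zones L M s = true ∧ s ≤ i ∧ i < s + L := by
  unfold pvP
  rw [List.any_eq_true]
  constructor
  · rintro ⟨s, hs, hb⟩
    rw [PySem.List.mem_pyRange_one] at hs
    simp only [Bool.and_eq_true, decide_eq_true_eq] at hb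
    exact ⟨s, hs.1, hs.2, hb.1.1, hb.1.2, hb.2⟩
  · rintro ⟨s, h0, hm, hw, h1, h2⟩
    refine ⟨s, by rw [PySem.List.mem_pyRange_one]; omega, ?_⟩
    simp only [Bool.and_eq_true, decide_eq_true_eq]
    exact ⟨⟨hw, h1⟩, h2⟩

theorem pvP_succ (zones : List Int) (L M : Int) (k : Nat) (i : Int) :
    pvP zones L M ((k : Int) + 1) i =
      (pvP zones L M k i ||
        (pvWin zones L M k && decide ((k : Int) ≤ i) && decide (i < (k : Int) + L))) := by
  unfold pvP
  rw [PySem.List.pyRange_one_succ_right (by positivity), List.any_append]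
  simp

-- the window [a,b) inside [0,n) as a filter of the full range
theorem pv_range_window (n a b : Int) (h0 : 0 ≤ a) (hab : a ≤ b) (hbn : b ≤ n) :
    (PySem.List.pyRange 0 n 1).filter (fun i => decide (a ≤ i) && decide (i < b))
      = PySem.List.pyRange a b 1 := by
  rw [PySem.List.pyRange_one_append 0 a n h0 (by omega),
      PySem.List.pyRange_one_append a b n hab hbn, List.filter_append, List.filter_append]
  have h1 : (PySem.List.pyRange 0 a 1).filter (fun i => decide (a ≤ i) && decide (i < b)) = [] := by
    apply List.filter_eq_nil_iff.mpr
    intro i hi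
    rw [PySem.List.mem_pyRange_one] at hi
    simp only [Bool.and_eq_true, decide_eq_true_eq]
    omega
  have h2 : (PySem.List.pyRange a b 1).filter (fun i => decide (a ≤ i) && decide (i < b))
      = PySem.List.pyRange a b 1 := by
    apply List.filter_eq_self.mpr
    intro i hi
    rw [PySem.List.mem_pyRange_one] at hi
    simp only [Bool.and_eq_true, decide_eq_true_eq]
    omega
  have h3 : (PySem.List.pyRange b n 1).filter (fun i => decide (a ≤ i) && decide (i < b)) = [] := by
    apply List.filter_eq_nil_iff.mpr
    intro i hi
    rw [PySem.List.mem_pyRange_one] at hi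
    simp only [Bool.and_eq_true, decide_eq_true_eq]
    omega
  rw [h1, h2, h3]
  simp

-- Python slice zones[s:s+L] all-good  =  pvWin
theorem pv_window_all (zones : List Int) (L M s : Int) (h0 : 0 ≤ s) (hL : 0 ≤ L)
    (hsL : s + L ≤ (zones.length : Int)) :
    (PySem.List.slice zones (some s) (some (s + L))).all (fun z => decide (M < z))
      = pvWin zones L M s := by
  rw [Bool.eq_iff_iff]
  rw [PySem.List.slice_toNat zones h0 (by omega), List.all_eq_true, pvWin_iff]
  have hlen : s.toNat + ((s + L).toNat - s.toNat) ≤ zones.length := by omega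
  constructor
  · intro h j h1 h2
    have hjn : j.toNat < zones.length := by omega
    have hmem : zones.getD j.toNat 0 ∈ (zones.drop s.toNat).take ((s + L).toNat - s.toNat) := by
      rw [List.getD_eq_getElem zones 0 hjn]
      rw [List.mem_iff_getElem]
      refine ⟨j.toNat - s.toNat, ?_, ?_⟩
      · simp only [List.length_take, List.length_drop]
        omega
      · rw [List.getElem_take, List.getElem_drop]
        congr 1
        omega
    have := h _ hmem
    unfold pvGood
    simpa using this
  · intro h z hz
    rw [List.mem_iff_getElem] at hz
    obtain ⟨k, hk, hzk⟩ := hz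
    simp only [List.length_take, List.length_drop] at hk
    have hk' : s.toNat + k < zones.length := by omega
    have hzk' : z = zones.getD (s.toNat + k) 0 := by
      rw [List.getD_eq_getElem zones 0 hk']
      rw [← hzk, List.getElem_take, List.getElem_drop]
    have hgd := h ((s : Int) + (k : Int)) (by omega) (by omega)
    unfold pvGood at hgd
    have : ((s : Int) + (k : Int)).toNat = s.toNat + k := by omega
    rw [this] at hgd
    rw [hzk']
    simpa using hgd

theorem pv_pyRange_toNat (b : Int) :
    PySem.List.pyRange 0 b 1 = PySem.List.pyRange 0 ((b.toNat : Int)) 1 := by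
  rw [PySem.List.pyRange_one, PySem.List.pyRange_one]
  have h : (b - 0).toNat = (((b.toNat : Int)) - 0).toNat := by omega
  rw [h]

theorem pvP_toNat (zones : List Int) (L M m i : Int) :
    pvP zones L M ((m.toNat : Int)) i = pvP zones L M m i := by
  unfold pvP
  rw [← pv_pyRange_toNat]
theorem pv_inner_fold (ws : List Int) (R : List Int) (hws : ws.Pairwise (· < ·)) :
    ws.foldl (fun res i => if res.contains i then res else res ++ [i]) R
      = R ++ ws.filter (fun i => !(R.contains i)) := by
  induction ws generalizing R with
  | nil => simp
  | cons a t ih =>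
    rcases List.pairwise_cons.mp hws with ⟨ha, ht⟩
    by_cases hc : R.contains a
    · simp only [List.foldl_cons, List.filter_cons, hc, Bool.not_true,
        if_pos trivial, if_neg (Bool.false_ne_true)]
      rw [ih R ht]
    · simp only [List.foldl_cons, if_neg hc]
      rw [ih (R ++ [a]) ht]
      have he : t.filter (fun i => !((R ++ [a]).contains i)) = t.filter (fun i => !(R.contains i)) := by
        apply List.filter_congr
        intro i hi
        have hne : i ≠ a := by have := ha i hi; omega
        simp [List.contains_eq_mem, hne]
      rw [he]
      have hcf : R.contains a = false := by simpa using hc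
      simp [List.filter_cons, hcf]
      simpa [List.contains_eq_mem] using hc
  
theorem pv_filter_split (l : List Int) (p q : Int → Bool) (hl : l.Pairwise (· < ·))
    (h : ∀ i ∈ l, q i = true → p i = false → ∀ j ∈ l, p j = true → j < i) :
    l.filter p ++ l.filter (fun i => q i && !p i) = l.filter (fun i => p i || q i) := by
  induction l with
  | nil => simp
  | cons a t ih =>
    rcases List.pairwise_cons.mp hl with ⟨ha, ht⟩
    have hmem : ∀ i ∈ t, q i = true → p i = false → ∀ j ∈ t, p j = true → j < i := by
      intro i hi hq hp j hj hpj
      exact h i (List.mem_cons_of_mem _ hi) hq hp j (List.mem_cons_of_mem _ hj) hpj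
    by_cases hpa : p a = true
    · simp only [List.filter_cons, hpa, Bool.true_or, Bool.not_true, Bool.and_false,
        if_pos trivial, if_neg (Bool.false_ne_true), List.cons_append]
      rw [ih ht hmem]
    · have hpa' : p a = false := by simpa using hpa
      by_cases hqa : q a = true
      · have hpt : ∀ i ∈ t, p i = false := by
          intro i hi
          by_contra hpi
          have hpi' : p i = true := by simpa using hpi
          have h1 := h a (List.mem_cons_self) hqa hpa' i (List.mem_cons_of_mem _ hi) hpi'
          have h2 := ha i hi
          omega
        have h1 : t.filter p = [] := List.filter_eq_nil_iff.mpr (by intro i hi; simp [hpt i hi])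
        have h2 : t.filter (fun i => p i || q i) = t.filter (fun i => q i && !p i) := by
          apply List.filter_congr
          intro i hi; simp [hpt i hi]
        simp only [List.filter_cons, hpa', hqa, Bool.false_or, Bool.and_true, Bool.not_false,
          if_pos trivial, if_neg (Bool.false_ne_true)]
        rw [h1, h2]
        simp
      · have hqa' : q a = false := by simpa using hqa
        simp only [List.filter_cons, hpa', hqa', Bool.false_or, Bool.false_and,
          if_neg (Bool.false_ne_true)]
        rw [ih ht hmem]

theorem pv_A_fold (zones : List Int) (L M : Int) (hL : 1 ≤ L) :
    ∀ (k : Nat), (k : Int) ≤ max ((zones.length : Int) - L + 1) 0 →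
    (PySem.List.pyRange 0 (k : Int) 1).foldl
      (fun result start =>
        if (PySem.List.slice zones (some start) (some (start + L))).all
            (fun z => decide (M < z)) then
          (PySem.List.pyRange start (start + L) 1).foldl
            (fun res i => if res.contains i then res else res ++ [i]) result
        else result) []
    = (PySem.List.pyRange 0 (zones.length : Int) 1).filter
        (fun i => pvP zones L M (k : Int) i) := by
  intro k
  induction k with
  | zero =>
    intro _
    rw [PySem.List.pyRange_one_eq_nil (by norm_num)]
    simp only [List.foldl_nil]
    symm
    apply List.filter_eq_nil_iff.mpr
    intro i _
    rw [Bool.not_eq_true, ← Bool.not_eq_true, pvP_iff]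
    rintro ⟨s, h0, hm, _⟩
    simp at hm
    omega
  | succ k ih =>
    intro hk1
    have hcast : ((k + 1 : Nat) : Int) = (k : Int) + 1 := by push_cast; ring
    rw [hcast] at hk1 ⊢
    have hn : (k : Int) + L ≤ (zones.length : Int) := by
      have h0 : (0 : Int) ≤ (k : Int) := by positivity
      omega
    have hk0 : (0 : Int) ≤ (k : Int) := by positivity
    rw [PySem.List.pyRange_one_succ_right (by positivity), List.foldl_append]
    rw [ih (by omega)]
    simp only [List.foldl_cons, List.foldl_nil]
    rw [pv_window_all zones L M (k : Int) hk0 (by omega) hn]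
    by_cases hw : pvWin zones L M (k : Int) = true
    · rw [if_pos hw]
      rw [pv_inner_fold _ _ (PySem.List.pairwise_lt_pyRange_one _ _)]
      have hconv : (PySem.List.pyRange (k : Int) ((k : Int) + L) 1).filter
            (fun i => !(((PySem.List.pyRange 0 (zones.length : Int) 1).filter
              (fun i => pvP zones L M (k : Int) i)).contains i))
          = (PySem.List.pyRange (k : Int) ((k : Int) + L) 1).filter
            (fun i => !(pvP zones L M (k : Int) i)) := by
        apply List.filter_congr
        intro i hi
        rw [PySem.List.mem_pyRange_one] at hi
        congr 1
        rw [Bool.eq_iff_iff]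
        simp only [List.contains_eq_mem, decide_eq_true_eq, List.mem_filter,
          PySem.List.mem_pyRange_one]
        constructor
        · rintro ⟨_, h⟩; exact h
        · intro h; exact ⟨⟨by omega, by omega⟩, h⟩
      rw [hconv]
      rw [← pv_range_window (zones.length : Int) (k : Int) ((k : Int) + L) hk0 (by omega) hn]
      rw [List.filter_filter]
      have hswap : ∀ i : Int,
          (!pvP zones L M (k : Int) i && (decide ((k : Int) ≤ i) && decide (i < (k : Int) + L)))
            = ((decide ((k : Int) ≤ i) && decide (i < (k : Int) + L)) && !pvP zones L M (k : Int) i) :=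
        fun i => Bool.and_comm _ _
      simp only [hswap]
      rw [pv_filter_split _ _ _ (PySem.List.pairwise_lt_pyRange_one _ _) ?side]
      case side =>
        intro i hi hq hp j hj hpj
        rw [pvP_iff] at hpj
        obtain ⟨s, hs0, hsk, hws, hsj, hjs⟩ := hpj
        simp only [Bool.and_eq_true, decide_eq_true_eq] at hq
        by_contra hij
        have hij' : i ≤ j := by omega
        have : pvP zones L M (k : Int) i = true := by
          rw [pvP_iff]
          exact ⟨s, hs0, hsk, hws, by omega, by omega⟩
        rw [this] at hp
        exact absurd hp (by simp)
      apply List.filter_congr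
      intro i _
      rw [pvP_succ zones L M k i, hw]
      simp [Bool.or_comm]
    · rw [if_neg hw]
      apply List.filter_congr
      intro i _
      rw [pvP_succ zones L M k i]
      have hw' : pvWin zones L M (k : Int) = false := by simpa using hw
      rw [hw']
      simp

theorem pv_runs_filter (zones : List Int) (L M : Int) (hL : 1 ≤ L) (k c : Int)
    (hc0 : 0 ≤ c) (hck : c ≤ k) (hkn : k ≤ (zones.length : Int))
    (hrun : ∀ j, k - c ≤ j → j < k → pvGood zones M j = true)
    (hleft : c = k ∨ pvGood zones M (k - c - 1) = false)
    (hkcut : ∀ s, 0 ≤ s → s + L ≤ (zones.length : Int) → pvWin zones L M s = true →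
      ¬ (s ≤ k ∧ k < s + L)) :
    (PySem.List.pyRange (k - c) k 1).filter
        (fun i => pvP zones L M ((zones.length : Int) - L + 1) i)
      = if L ≤ c then PySem.List.pyRange (k - c) k 1 else [] := by
  by_cases hLc : L ≤ c
  · rw [if_pos hLc]
    apply List.filter_eq_self.mpr
    intro i hi
    rw [PySem.List.mem_pyRange_one] at hi
    rw [pvP_iff]
    refine ⟨min i (k - L), by omega, by omega, ?_, by omega, by omega⟩
    rw [pvWin_iff]
    intro j h1 h2
    exact hrun j (by omega) (by omega)
  · rw [if_neg hLc]
    apply List.filter_eq_nil_iff.mpr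
    intro i hi
    rw [PySem.List.mem_pyRange_one] at hi
    rw [← Bool.not_eq_true] at *
    rw [pvP_iff]
    rintro ⟨s, hs0, hsm, hws, hsi, his⟩
    have hgood := (pvWin_iff zones L M s).mp hws
    have hcut := hkcut s hs0 (by omega) hws
    have hsLk : s + L ≤ k := by omega
    have hsge : k - c ≤ s := by
      by_contra hlt
      have hg : pvGood zones M (k - c - 1) = true := hgood (k - c - 1) (by omega) (by omega)
      rcases hleft with h | h
      · omega
      · exact h hg
    omega

theorem pv_B_fold (zones : List Int) (L M : Int) (hL : 1 ≤ L) :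
    ∀ (k : Nat), k ≤ zones.length →
    ∃ c : Nat, c ≤ k ∧
      (∀ j : Int, (k : Int) - c ≤ j → j < (k : Int) → pvGood zones M j = true) ∧
      (c = k ∨ pvGood zones M ((k : Int) - c - 1) = false) ∧
      (PySem.List.enumerate (zones.take k) 0).foldl
        (fun (s : List Int × Int) p =>
          if M < p.2 then (s.1, s.2 + 1)
          else
            (if L ≤ s.2 then s.1 ++ PySem.List.pyRange (p.1 - s.2) p.1 1 else s.1, 0))
        ([], 0)
      = ((PySem.List.pyRange 0 ((k : Int) - c) 1).filter
          (fun i => pvP zones L M ((zones.length : Int) - L + 1) i), (c : Int)) := by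
  intro k
  induction k with
  | zero =>
    intro _
    refine ⟨0, le_refl _, by intro j h1 h2; omega, Or.inl rfl, ?_⟩
    simp [PySem.List.enumerate_nil]
  | succ k ih =>
    intro hk1
    obtain ⟨c, hck, hrun, hleft, hfold⟩ := ih (by omega)
    have hklen : k < zones.length := by omega
    have htake : zones.take (k + 1) = zones.take k ++ [zones[k]] := by
      rw [List.take_succ, List.getElem?_eq_getElem hklen]
      rfl
    rw [htake, PySem.List.enumerate_append, List.foldl_append, hfold]
    rw [List.length_take, min_eq_left (by omega)]
    simp only [PySem.List.enumerate_cons, PySem.List.enumerate_nil, List.foldl_cons,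
      List.foldl_nil, zero_add]
    have hgk : pvGood zones M (k : Int) = (decide (M < zones[k])) := by
      unfold pvGood
      have : ((k : Int)).toNat = k := by omega
      rw [this, List.getD_eq_getElem zones 0 hklen]
    by_cases hz : M < zones[k]
    · refine ⟨c + 1, by omega, ?_, ?_, ?_⟩
      · intro j h1 h2
        push_cast at h1 h2
        by_cases hjk : j < (k : Int)
        · exact hrun j (by omega) hjk
        · have : j = (k : Int) := by omega
          rw [this, hgk]
          simpa using hz
      · rcases hleft with h | h
        · left; omega
        · right
          have he : ((k + 1 : Nat) : Int) - ((c + 1 : Nat) : Int) - 1 = (k : Int) - (c : Int) - 1 := by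
            push_cast; ring
          rw [he]
          exact h
      · rw [if_pos hz]
        push_cast
        have he : (k : Int) + 1 - ((c : Int) + 1) = (k : Int) - (c : Int) := by ring
        rw [he]
    · -- run ends at k
      refine ⟨0, by omega, by intro j h1 h2; push_cast at h1 h2; omega, Or.inr ?_, ?_⟩
      · have he : ((k + 1 : Nat) : Int) - ((0 : Nat) : Int) - 1 = (k : Int) := by push_cast; ring
        rw [he, hgk]
        simpa using hz
      · rw [if_neg hz]
        have hgkf : pvGood zones M (k : Int) = false := by rw [hgk]; simpa using hz
        have hcut : ∀ s, 0 ≤ s → s + L ≤ (zones.length : Int) → pvWin zones L M s = true →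
            ¬ (s ≤ (k : Int) ∧ (k : Int) < s + L) := by
          rintro s hs0 hsn hws ⟨h1, h2⟩
          have := (pvWin_iff zones L M s).mp hws (k : Int) h1 h2
          rw [hgkf] at this
          exact absurd this (by simp)
        have hrange : PySem.List.pyRange 0 ((k : Int) + 1) 1
            = PySem.List.pyRange 0 ((k : Int) - c) 1 ++ PySem.List.pyRange ((k : Int) - c) (k : Int) 1
              ++ [(k : Int)] := by
          rw [PySem.List.pyRange_one_succ_right (by positivity),
              PySem.List.pyRange_one_append 0 ((k : Int) - c) (k : Int) (by omega) (by omega)]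
        have hPk : pvP zones L M ((zones.length : Int) - L + 1) (k : Int) = false := by
          rw [← Bool.not_eq_true, pvP_iff]
          rintro ⟨s, hs0, hsm, hws, hsk, hks⟩
          exact hcut s hs0 (by omega) hws ⟨hsk, hks⟩
        have hmid := pv_runs_filter zones L M hL (k : Int) (c : Int) (by positivity) (by omega)
          (by omega) hrun (hleft.imp (fun h => by exact_mod_cast h) id) hcut
        rw [Prod.mk.injEq]
        refine ⟨?_, by simp⟩
        by_cases hLc : L ≤ (c : Int)
        · rw [if_pos hLc]
          push_cast
          rw [sub_zero, hrange, List.filter_append, List.filter_append, hmid, if_pos hLc]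
          simp [List.filter_cons, hPk, List.append_assoc]
        · rw [if_neg hLc]
          push_cast
          rw [sub_zero, hrange, List.filter_append, List.filter_append, hmid, if_neg hLc]
          simp [List.filter_cons, hPk]

-- ===== glue =====

theorem pv_foldl_const {α β : Type} (l : List β) (f : α → β → α) (init : α)
    (h : ∀ acc x, x ∈ l → f acc x = acc) : l.foldl f init = init := by
  induction l generalizing init with
  | nil => rfl
  | cons a t ih =>
    rw [List.foldl_cons, h init a (by simp)]
    exact ih init (fun acc x hx => h acc x (by simp [hx]))

theorem pv_A_nonpos (zones : List Int) (L M : Int) (hL : L ≤ 0) :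
    none_within_zone_py zones L M = [] := by
  simp only [none_within_zone_py]
  show (PySem.List.pyRange 0 ((zones.length : Int) - L + 1) 1).foldl
      (fun result start =>
        if (PySem.List.slice zones (some start) (some (start + L))).all
            (fun z => decide (M < z)) then
          (PySem.List.pyRange start (start + L) 1).foldl
            (fun res i => if res.contains i then res else res ++ [i]) result
        else result) [] = _
  apply pv_foldl_const
  intro acc start _
  have hnil : PySem.List.pyRange start (start + L) 1 = [] :=
    PySem.List.pyRange_one_eq_nil (by omega)
  rw [hnil]
  simp

theorem main_eq (zones : List Int) (L M : Int) :
    none_within_zone_py zones L M = none_within_zone_py_alt zones L M := by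
  by_cases hL : L ≤ 0
  · rw [pv_A_nonpos zones L M hL]
    unfold none_within_zone_py_alt
    rw [if_pos hL]
  · have hL1 : 1 ≤ L := by omega
    have hA : none_within_zone_py zones L M
        = (PySem.List.pyRange 0 (zones.length : Int) 1).filter
            (fun i => pvP zones L M ((zones.length : Int) - L + 1) i) := by
      simp only [none_within_zone_py]
      show (PySem.List.pyRange 0 ((zones.length : Int) - L + 1) 1).foldl
          (fun result start =>
            if (PySem.List.slice zones (some start) (some (start + L))).all
                (fun z => decide (M < z)) then
              (PySem.List.pyRange start (start + L) 1).foldl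
                (fun res i => if res.contains i then res else res ++ [i]) result
            else result) [] = _
      rw [pv_pyRange_toNat ((zones.length : Int) - L + 1)]
      have := pv_A_fold zones L M hL1 ((zones.length : Int) - L + 1).toNat (by omega)
      rw [this]
      apply List.filter_congr
      intro i _
      rw [pvP_toNat]
    obtain ⟨c, hck, hrun, hleft, hfold⟩ := pv_B_fold zones L M hL1 zones.length (le_refl _)
    rw [List.take_length] at hfold
    have hcut : ∀ s, 0 ≤ s → s + L ≤ (zones.length : Int) → pvWin zones L M s = true →
        ¬ (s ≤ (zones.length : Int) ∧ (zones.length : Int) < s + L) := by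
      rintro s _ hsn _ ⟨_, h2⟩
      omega
    have hmid := pv_runs_filter zones L M hL1 (zones.length : Int) (c : Int)
      (by positivity) (by exact_mod_cast hck) (le_refl _) hrun
      (hleft.imp (fun h => by exact_mod_cast h) id) hcut
    have hsplit : (PySem.List.pyRange 0 (zones.length : Int) 1).filter
          (fun i => pvP zones L M ((zones.length : Int) - L + 1) i)
        = (PySem.List.pyRange 0 ((zones.length : Int) - c) 1).filter
            (fun i => pvP zones L M ((zones.length : Int) - L + 1) i)
          ++ (if L ≤ (c : Int) then PySem.List.pyRange ((zones.length : Int) - c) (zones.length : Int) 1 else []) := by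
      rw [PySem.List.pyRange_one_append 0 ((zones.length : Int) - c) (zones.length : Int)
        (by omega) (by omega), List.filter_append, hmid]
    unfold none_within_zone_py_alt
    rw [if_neg hL, hfold]
    by_cases hLc : L ≤ (c : Int)
    · rw [if_pos hLc]
      rw [hA, hsplit, if_pos hLc]
    · rw [if_neg hLc]
      rw [hA, hsplit, if_neg hLc]
      simp

-- ===== VERDICT (by name: the statement is the Claim_ definition above) =====
theorem none_within_zone_py_spec : Claim_equal_none_within_zone_py := by
  intro zones L M _
  unfold Spec_none_within_zone_py
  exact main_eq zones L M
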